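-- pv_equiv track=rewrite | github.com/fareedhayat/multi-agent-web-dev-test-automation | agents/angie_selenium_mcp.py | split_plan_into_suites
-- ===== SOURCE A (Python) =====
-- from typing import Annotated, Any, Dict, Optional
--
-- def split_plan_into_suites(plan_markdown: str) -> list[tuple[str, str]]:
--     """Break the Markdown plan into per-suite sections."""
--     suites: list[tuple[str, str]] = []
--     current_name: Optional[str] = None
--     current_lines: list[str] = []
--     for raw_line in plan_markdown.splitlines():
--         stripped = raw_line.strip()
--         if stripped.startswith("## "):
--             if current_name and current_lines:
--                 suites.append((current_name, "\n".join(current_lines).strip()))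
--             current_name = stripped[3:].strip()
--             current_lines = [stripped]
--         elif current_name:
--             if stripped == "---":
--                 continue
--             current_lines.append(raw_line)
--     if current_name and current_lines:
--         suites.append((current_name, "\n".join(current_lines).strip()))
--     return [(name, section) for name, section in suites if section]
-- ===== SOURCE B (Python) =====
-- def split_plan_into_suites(plan_markdown: str) -> list[tuple[str, str]]:
--     """Break the Markdown plan into per-suite sections.
--
--     Stateless segment scan: find each header, take the block of lines up to
--     the next header as its body, build the section directly.
--     """
--     lines = plan_markdown.splitlines()
--     n = len(lines)
--     result: list[tuple[str, str]] = []
--     i = 0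
--     while i < n:
--         header = lines[i].strip()
--         if not header.startswith("## "):
--             i += 1
--             continue
--         j = i + 1
--         while j < n and not lines[j].strip().startswith("## "):
--             j += 1
--         name = header[3:].strip()
--         if name:
--             body = [line for line in lines[i + 1:j] if line.strip() != "---"]
--             section = "\n".join([header] + body).strip()
--             if section:
--                 result.append((name, section))
--         i = j
--     return result
-- ===== Notes on version B (the rewrite author's own statement) =====
-- stated objective: alternative
-- what changed: Replaces A's stateful accumulate-and-flush loop (current_name/current_lines carried across iterations, flushed at the next header and after the loop) by a stateless segment scan that finds each header and directly takes the block of lines up to the next header as its body.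
import Mathlib
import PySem

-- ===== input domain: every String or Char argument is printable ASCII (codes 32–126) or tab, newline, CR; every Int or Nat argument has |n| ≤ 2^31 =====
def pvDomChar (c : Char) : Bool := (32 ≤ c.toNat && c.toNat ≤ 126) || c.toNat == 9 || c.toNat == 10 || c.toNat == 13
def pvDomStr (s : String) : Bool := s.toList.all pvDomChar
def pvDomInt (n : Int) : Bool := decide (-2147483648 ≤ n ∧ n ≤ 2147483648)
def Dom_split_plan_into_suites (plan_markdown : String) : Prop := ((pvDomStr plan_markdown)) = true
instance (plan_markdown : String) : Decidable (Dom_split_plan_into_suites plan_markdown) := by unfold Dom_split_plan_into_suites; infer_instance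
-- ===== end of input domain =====

-- B replaces A's stateful accumulate-and-flush loop by a stateless segment scan
-- (find each header, take the lines up to the next header as its body); objective: alternative decomposition.

-- ===== PORT A =====
-- Python truthiness of `current_name : Optional[str]`
def pvTruthy : Option String → Bool
  | some n => n != ""
  | none => false

-- `if current_name and current_lines: suites.append((current_name, "\n".join(current_lines).strip()))`
def pvFlush (suites : List (String × String)) (cn : Option String) (cls : List String) :
    List (String × String) :=
  if pvTruthy cn && !cls.isEmpty then
    suites ++ [(cn.getD "", PySem.Str.strip (PySem.Str.join "\n" cls))]
  else suites

-- the for-loop of A as structural recursion over the lines, carrying (suites, current_name, current_lines);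
-- the trailing flush of A happens at the end of the list
def pvAGo (suites : List (String × String)) (cn : Option String) (cls : List String) :
    List String → List (String × String)
  | [] => pvFlush suites cn cls
  | rawLine :: rest =>
    let stripped := PySem.Str.strip rawLine
    if PySem.Str.startswith stripped "## " then
      pvAGo (pvFlush suites cn cls)
        (some (PySem.Str.strip (PySem.Str.slice stripped (some 3) none))) [stripped] rest
    else if pvTruthy cn then
      if stripped == "---" then pvAGo suites cn cls rest
      else pvAGo suites cn (cls ++ [rawLine]) rest
    else pvAGo suites cn cls rest

def split_plan_into_suites (plan_markdown : String) : List (String × String) :=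
  (pvAGo [] none [] (PySem.Str.splitlines plan_markdown)).filter (fun ns => ns.2 != "")

-- ===== PORT B =====
def pvNotHeader (l : String) : Bool := !PySem.Str.startswith (PySem.Str.strip l) "## "

-- Source B's outer while loop: skip non-header lines one by one; at a header, the inner
-- `while j < n and not header` scan is the takeWhile/dropWhile split of the remaining lines
def pvBGo : List String → List (String × String)
  | [] => []
  | l :: rest =>
    if pvNotHeader l then pvBGo rest
    else
      let header := PySem.Str.strip l
      let name := PySem.Str.strip (PySem.Str.slice header (some 3) none)
      let bodyBlock := rest.takeWhile pvNotHeader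
      let rest' := rest.dropWhile pvNotHeader
      if name != "" then
        let body := bodyBlock.filter (fun x => PySem.Str.strip x != "---")
        let sect := PySem.Str.strip (PySem.Str.join "\n" (header :: body))
        if sect != "" then (name, sect) :: pvBGo rest' else pvBGo rest'
      else pvBGo rest'
  termination_by l => l.length
  decreasing_by
    all_goals simp only [List.length_cons]
    all_goals first
      | omega
      | exact Nat.lt_succ_of_le (List.length_dropWhile_le _ _)

def split_plan_into_suites_alt (plan_markdown : String) : List (String × String) :=
  pvBGo (PySem.Str.splitlines plan_markdown)

-- ===== PRECONDITION & SPEC =====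
def Spec_split_plan_into_suites (plan_markdown : String) (out : List (String × String)) : Prop := out = split_plan_into_suites_alt plan_markdown
instance (plan_markdown : String) (out : List (String × String)) : Decidable (Spec_split_plan_into_suites plan_markdown out) := by unfold Spec_split_plan_into_suites; infer_instance

-- ===== CLAIM (what is proved, stated in full; the proofs are below) =====
def Claim_equal_split_plan_into_suites : Prop := ∀ (plan_markdown : String), Dom_split_plan_into_suites plan_markdown → Spec_split_plan_into_suites plan_markdown (split_plan_into_suites plan_markdown)

-- ===== LEMMAS AND PROOFS =====

-- the one section A's flush would emit for an active state (cn = some n, n ≠ ""), before the final filter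
def pvOne (n : String) (cls : List String) (lines : List String) : List (String × String) :=
  [(n, PySem.Str.strip (PySem.Str.join "\n"
      (cls ++ (lines.takeWhile pvNotHeader).filter (fun x => PySem.Str.strip x != "---"))))]

def pvF : String × String → Bool := fun ns => ns.2 != ""

lemma pvBGo_cons_notHeader {l : String} (rest : List String) (h : pvNotHeader l = true) :
    pvBGo (l :: rest) = pvBGo rest := by
  rw [pvBGo]; simp [h]

lemma pvBGo_dropWhile (lines : List String) :
    pvBGo (lines.dropWhile pvNotHeader) = pvBGo lines := by
  induction lines with
  | nil => rfl
  | cons l rest ih =>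
    by_cases h : pvNotHeader l
    · rw [List.dropWhile_cons_of_pos h, ih, pvBGo_cons_notHeader rest h]
    · rw [List.dropWhile_cons_of_neg h]

lemma pvMain (lines : List String) :
    (∀ S cn cls, pvTruthy cn = false →
        (pvAGo S cn cls lines).filter pvF = S.filter pvF ++ pvBGo lines) ∧
    (∀ S n cls, n ≠ "" → cls ≠ [] →
        (pvAGo S (some n) cls lines).filter pvF =
          S.filter pvF ++ (pvOne n cls lines).filter pvF ++ pvBGo (lines.dropWhile pvNotHeader)) := by
  induction lines with
  | nil =>
    constructor
    · intro S cn cls hcn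
      simp [pvAGo, pvFlush, hcn, pvBGo]
    · intro S n cls hn hcls
      simp only [pvAGo, pvFlush, pvTruthy, pvOne, List.takeWhile_nil, List.dropWhile_nil, pvBGo]
      have h1 : (n != "") = true := by simpa using hn
      have h2 : (!cls.isEmpty) = true := by simpa [List.isEmpty_iff] using hcls
      simp [h1, h2, List.filter_append]
  | cons l rest ih =>
    have hdrCase : PySem.Str.startswith (PySem.Str.strip l) "## " = true → ∀ S : List (String × String),
        (pvAGo S (some (PySem.Str.strip (PySem.Str.slice (PySem.Str.strip l) (some 3) none)))
            [PySem.Str.strip l] rest).filter pvF = S.filter pvF ++ pvBGo (l :: rest) := by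
      intro hh S
      have hnh : pvNotHeader l = false := by
        simp only [pvNotHeader, hh, Bool.not_true]
      by_cases hn : PySem.Str.strip (PySem.Str.slice (PySem.Str.strip l) (some 3) none) = ""
      · rw [ih.1 S _ [PySem.Str.strip l] (by simp [pvTruthy, hn])]
        rw [pvBGo]
        simp [hnh, hn, pvBGo_dropWhile]
      · rw [ih.2 S _ [PySem.Str.strip l] hn (by simp)]
        rw [pvBGo]
        have hn' : (PySem.Str.strip (PySem.Str.slice (PySem.Str.strip l) (some 3) none) != "") = true := by
          simpa using hn
        simp only [hnh, Bool.false_eq_true, if_false, hn', if_true]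
        by_cases hs : PySem.Str.strip (PySem.Str.join "\n"
            (PySem.Str.strip l :: List.filter (fun x => PySem.Str.strip x != "---")
              (List.takeWhile pvNotHeader rest))) = ""
        · simp [pvOne, pvF, hs, pvBGo_dropWhile]
        · simp [pvOne, pvF, hs, pvBGo_dropWhile]
    constructor
    · intro S cn cls hcn
      cases hh : PySem.Str.startswith (PySem.Str.strip l) "## " with
      | true =>
        rw [pvAGo]
        simp only [hh, if_true]
        have hfl : pvFlush S cn cls = S := by simp [pvFlush, hcn]
        rw [hfl]
        exact hdrCase hh S
      | false =>
        have hnot : pvNotHeader l = true := by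
          simp only [pvNotHeader, hh, Bool.not_false]
        rw [pvAGo]
        simp only [hh, Bool.false_eq_true, if_false, hcn]
        rw [ih.1 S cn cls hcn, pvBGo_cons_notHeader rest hnot]
    · intro S n cls hn hcls
      have htr : pvTruthy (some n) = true := by simpa [pvTruthy] using hn
      cases hh : PySem.Str.startswith (PySem.Str.strip l) "## " with
      | true =>
        have hnh : pvNotHeader l = false := by
          simp only [pvNotHeader, hh, Bool.not_true]
        rw [pvAGo]
        simp only [hh, if_true]
        rw [hdrCase hh _]
        have hfl : pvFlush S (some n) cls =
            S ++ [(n, PySem.Str.strip (PySem.Str.join "\n" cls))] := by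
          simp [pvFlush, htr, List.isEmpty_iff, hcls]
        rw [hfl]
        have ht : List.takeWhile pvNotHeader (l :: rest) = [] := by
          simp [List.takeWhile_cons, hnh]
        have hdw : List.dropWhile pvNotHeader (l :: rest) = l :: rest := by
          simp [List.dropWhile_cons, hnh]
        simp [pvOne, ht, hdw, List.filter_append]
      | false =>
        have hnot : pvNotHeader l = true := by
          simp only [pvNotHeader, hh, Bool.not_false]
        rw [pvAGo]
        simp only [hh, Bool.false_eq_true, if_false, htr, if_true]
        rw [List.dropWhile_cons_of_pos hnot]
        cases hd : (PySem.Str.strip l == "---") with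
        | true =>
          rw [if_pos (by simpa using hd), ih.2 S n cls hn hcls]
          have he : pvOne n cls (l :: rest) = pvOne n cls rest := by
            simp [pvOne, List.takeWhile_cons_of_pos hnot, List.filter_cons, bne, hd]
          rw [he]
        | false =>
          rw [if_neg (by simpa using hd), ih.2 S n (cls ++ [l]) hn (by simp)]
          have he : pvOne n (cls ++ [l]) rest = pvOne n cls (l :: rest) := by
            simp [pvOne, List.takeWhile_cons_of_pos hnot, List.filter_cons, bne, hd]
          rw [he]

theorem pv_eq (lines : List String) :
    (pvAGo [] none [] lines).filter pvF = pvBGo lines := by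
  simpa using (pvMain lines).1 [] none [] rfl

-- ===== VERDICT (by name: the statement is the Claim_ definition above) =====
theorem split_plan_into_suites_spec : Claim_equal_split_plan_into_suites := by
  intro p _
  unfold Spec_split_plan_into_suites split_plan_into_suites split_plan_into_suites_alt
  exact pv_eq _
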